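-- pv_equiv track=rewrite | github.com/mferraro23/Coding | Python/Projects/Password_Gen/pw_generator.py | find_chars
-- ===== SOURCE A (Python) =====
-- def find_chars(strChars, chars):
--     useable_chars = ['a', 'b', 'c', 'd', 'e', 'f', 'g', 'h', 'i', 'j', 'k', 'l', 'm', 'n', 'o', 'p', 'q', 'r', 's', 't', 'u', 'v', 'w', 'x', 'y', 'z', '1', '2',
--                      '3', '4', '5', '6', '7', '8', '9', '0', "!", "@", "#", "$", "%", "^", "&", "*", "_", "=", "+", "(", ")", "{", "}", "[", "]", ";", ":", "<", ">", "?", "."]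
--     vals_to_remove = []
--     if strChars == "none":
--         return(useable_chars)
--     elif strChars == "alphabet":
--         for character in range(len(useable_chars)):
--             if useable_chars[character].isalpha():
--                 vals_to_remove.append(useable_chars[character])
--         for vals in vals_to_remove:
--             if vals in useable_chars:
--                 useable_chars.remove(vals)
--         return(useable_chars)
--     elif strChars == "numbers":
--         for integer in useable_chars:
--             if integer.isdigit():
--                 vals_to_remove.append(integer)
--         for vals in vals_to_remove:
--             if vals in useable_chars:
--                 useable_chars.remove(vals)
--         return(useable_chars)
--     elif strChars == "alnum":
--         for integer in useable_chars:
--             if not integer.isalnum():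
--                 vals_to_remove.append(integer)
--         for vals in vals_to_remove:
--             if vals in useable_chars:
--                 useable_chars.remove(vals)
--         return(useable_chars)
--     else:
--         for i in range(len(chars)):
--             if chars[i] in useable_chars:
--                 useable_chars.remove(chars[i])
--         return(useable_chars)
-- ===== SOURCE B (Python) =====
-- def find_chars(strChars, chars):
--     useable_chars = ['a', 'b', 'c', 'd', 'e', 'f', 'g', 'h', 'i', 'j', 'k', 'l', 'm', 'n', 'o', 'p', 'q', 'r', 's', 't', 'u', 'v', 'w', 'x', 'y', 'z', '1', '2',
--                      '3', '4', '5', '6', '7', '8', '9', '0', "!", "@", "#", "$", "%", "^", "&", "*", "_", "=", "+", "(", ")", "{", "}", "[", "]", ";", ":", "<", ">", "?", "."]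
--     if strChars == "none":
--         return useable_chars
--     if strChars == "alphabet":
--         keep = lambda c: not c.isalpha()
--     elif strChars == "numbers":
--         keep = lambda c: not c.isdigit()
--     elif strChars == "alnum":
--         keep = lambda c: c.isalnum()
--     else:
--         keep = lambda c: c not in chars
--     return [c for c in useable_chars if keep(c)]
-- ===== Notes on version B (the rewrite author's own statement) =====
-- stated objective: simpler
-- what changed: Replaces the two-pass collect-then-destructively-remove scheme (and the else branch's per-index list.remove loop) by choosing one keep-predicate per category and building the result in a single filtering pass.
import Mathlib
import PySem

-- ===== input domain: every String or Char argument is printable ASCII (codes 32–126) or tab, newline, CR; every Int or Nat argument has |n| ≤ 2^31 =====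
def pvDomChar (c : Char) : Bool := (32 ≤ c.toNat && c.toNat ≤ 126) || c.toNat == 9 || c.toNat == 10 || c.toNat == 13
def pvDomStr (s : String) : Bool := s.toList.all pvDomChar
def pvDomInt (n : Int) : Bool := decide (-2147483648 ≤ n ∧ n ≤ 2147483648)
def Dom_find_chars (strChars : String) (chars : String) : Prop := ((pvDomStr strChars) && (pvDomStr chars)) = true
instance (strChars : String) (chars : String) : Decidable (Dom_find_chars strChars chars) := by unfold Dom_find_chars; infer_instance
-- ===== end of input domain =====

-- B replaces A's collect-then-destructively-remove passes by one filtering pass with a per-category keep-predicate (simpler; same result, same order).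
set_option maxRecDepth 10000


-- ===== PORT A =====
-- the fixed character set (shared literal constant of both Pythons)
def pvUseable : List String :=
  ["a", "b", "c", "d", "e", "f", "g", "h", "i", "j", "k", "l", "m", "n", "o", "p", "q", "r", "s", "t", "u", "v", "w", "x", "y", "z", "1", "2",
   "3", "4", "5", "6", "7", "8", "9", "0", "!", "@", "#", "$", "%", "^", "&", "*", "_", "=", "+", "(", ")", "{", "}", "[", "]", ";", ":", "<", ">", "?", "."]

-- A's removal loop: 'for vals in vals_to_remove: if vals in useable_chars: useable_chars.remove(vals)'
def pvRemoveLoop (useable : List String) (vals_to_remove : List String) : List String :=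
  vals_to_remove.foldl
    (fun u v => if u.contains v then (PySem.List.remove? u v).getD u else u) useable

def find_chars (strChars : String) (chars : String) : List String :=
  let useable_chars := pvUseable
  if strChars == "none" then useable_chars
  else if strChars == "alphabet" then
    -- for character in range(len(useable_chars)): index access via pyGetD (index always in range)
    let vals := (PySem.List.pyRange 0 (useable_chars.length : Int) 1).foldl
      (fun acc i =>
        let s := PySem.List.pyGetD useable_chars i ""
        if PySem.Str.strIsalpha s then acc ++ [s] else acc) []
    pvRemoveLoop useable_chars vals
  else if strChars == "numbers" then
    let vals := useable_chars.foldl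
      (fun acc s => if PySem.Str.strIsdigit s then acc ++ [s] else acc) []
    pvRemoveLoop useable_chars vals
  else if strChars == "alnum" then
    let vals := useable_chars.foldl
      (fun acc s => if !PySem.Str.strIsalnum s then acc ++ [s] else acc) []
    pvRemoveLoop useable_chars vals
  else
    -- for i in range(len(chars)): chars[i] via pyGetD on the code points (index always in range)
    (PySem.List.pyRange 0 (PySem.Str.len chars) 1).foldl
      (fun u i =>
        let s := String.ofList [PySem.List.pyGetD chars.toList i ' ']
        if u.contains s then (PySem.List.remove? u s).getD u else u) useable_chars

-- ===== PORT B =====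
def find_chars_alt (strChars : String) (chars : String) : List String :=
  let useable_chars := pvUseable
  if strChars == "none" then useable_chars
  else
    let keep : String → Bool :=
      if strChars == "alphabet" then fun c => !PySem.Str.strIsalpha c
      else if strChars == "numbers" then fun c => !PySem.Str.strIsdigit c
      else if strChars == "alnum" then fun c => PySem.Str.strIsalnum c
      else fun c => !(PySem.Str.isIn c chars)
    useable_chars.filter keep

-- ===== PRECONDITION & SPEC =====
def Spec_find_chars (strChars : String) (chars : String) (out : List String) : Prop := out = find_chars_alt strChars chars
instance (strChars : String) (chars : String) (out : List String) : Decidable (Spec_find_chars strChars chars out) := by unfold Spec_find_chars; infer_instance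

-- ===== CLAIM (what is proved, stated in full; the proofs are below) =====
def Claim_equal_find_chars : Prop := ∀ (strChars : String) (chars : String), Dom_find_chars strChars chars → Spec_find_chars strChars chars (find_chars strChars chars)

-- ===== LEMMAS AND PROOFS =====

-- each guarded remove step is exactly an erase
theorem pv_step_eq_erase (u : List String) (s : String) :
    (if u.contains s then (PySem.List.remove? u s).getD u else u) = u.erase s := by
  by_cases h : s ∈ u
  · simp [h, PySem.List.remove?_eq_some_erase u s h]
  · simp [h, List.erase_of_not_mem h]

-- folding erase over a character list = one filtering pass (on a duplicate-free list)
theorem pv_foldl_erase_filter (l : List Char) (u : List String) (hu : u.Nodup) :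
    l.foldl (fun u c => u.erase (String.ofList [c])) u
      = u.filter (fun s => decide (s ∉ l.map (fun c => String.ofList [c]))) := by
  induction l generalizing u with
  | nil => simp
  | cons c cs ih =>
    simp only [List.foldl_cons]
    rw [ih _ (hu.erase _), hu.erase_eq_filter, List.filter_filter]
    refine List.filter_congr ?_
    intro s _
    by_cases h1 : s = String.ofList [c] <;> simp [h1, List.mem_cons]

theorem pv_singleton_infix_iff (c : Char) (l : List Char) : [c] <:+: l ↔ c ∈ l := by
  constructor
  · intro h; exact (List.singleton_sublist).1 h.sublist
  · intro h
    obtain ⟨s, t, rfl⟩ := List.append_of_mem h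
    exact ⟨s, t, by simp⟩

theorem pv_mem_map_mk (c : Char) (l : List Char) :
    String.ofList [c] ∈ l.map (fun d => String.ofList [d]) ↔ c ∈ l := by
  simp only [List.mem_map]
  constructor
  · rintro ⟨d, hd, he⟩
    have hcd : c = d := by
      have := congrArg String.toList he.symm
      simpa using this
    simpa [hcd] using hd
  · intro h; exact ⟨c, h, rfl⟩

theorem pvUseable_nodup : pvUseable.Nodup := by decide

theorem pvUseable_len1 : ∀ s ∈ pvUseable, s.toList.length = 1 := by decide

theorem pvUseable_singletons : ∀ s ∈ pvUseable, ∃ c, s = String.ofList [c] := by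
  intro s hs
  obtain ⟨c, hc⟩ : ∃ c, s.toList = [c] := List.length_eq_one_iff.mp (pvUseable_len1 s hs)
  exact ⟨c, by rw [← hc, String.ofList_toList]⟩

-- the else branch of A equals B's 'c not in chars' filter
theorem pv_else_eq (chars : String) :
    (PySem.List.pyRange 0 (PySem.Str.len chars) 1).foldl
      (fun u i =>
        let s := String.ofList [PySem.List.pyGetD chars.toList i ' ']
        if u.contains s then (PySem.List.remove? u s).getD u else u) pvUseable
      = pvUseable.filter (fun c => !(PySem.Str.isIn c chars)) := by
  have hlen : PySem.Str.len chars = PySem.List.len chars.toList := by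
    simp [PySem.Str.len_eq, PySem.List.len]
  rw [hlen]
  have h0 : ((0 : Int)).toNat = 0 := rfl
  rw [show (fun (u : List String) (i : Int) =>
        let s := String.ofList [PySem.List.pyGetD chars.toList i ' ']
        if u.contains s then (PySem.List.remove? u s).getD u else u)
      = (fun (u : List String) (i : Int) =>
          (fun (u : List String) (c : Char) =>
            if u.contains (String.ofList [c]) then (PySem.List.remove? u (String.ofList [c])).getD u else u)
          u (PySem.List.pyGetD chars.toList i ' ')) from rfl]
  have hfold := PySem.List.foldl_pyRange_pyGetD chars.toList ' '
      (fun (u : List String) (c : Char) =>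
        if u.contains (String.ofList [c]) then (PySem.List.remove? u (String.ofList [c])).getD u else u)
      pvUseable (le_refl (0:Int))
  rw [hfold]
  rw [h0, List.drop_zero]
  have hsteps : (fun (u : List String) (c : Char) =>
      if u.contains (String.ofList [c]) then (PySem.List.remove? u (String.ofList [c])).getD u else u)
      = fun (u : List String) (c : Char) => u.erase (String.ofList [c]) := by
    funext u c; exact pv_step_eq_erase u (String.ofList [c])
  rw [hsteps, pv_foldl_erase_filter _ _ pvUseable_nodup]
  refine List.filter_congr ?_
  intro s hs
  obtain ⟨c, rfl⟩ := pvUseable_singletons s hs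
  have h1 : PySem.Str.isIn (String.ofList [c]) chars = true ↔ c ∈ chars.toList := by
    rw [PySem.Str.isIn_iff_infix]
    exact (by simpa using pv_singleton_infix_iff c chars.toList)
  by_cases hc : c ∈ chars.toList
  · have hA : PySem.Str.isIn (String.ofList [c]) chars = true := h1.mpr hc
    simp only [PySem.Str.isIn_eq, String.toList_ofList] at hA
    simp [hA, pv_mem_map_mk, hc]
  · have hA : PySem.Str.isIn (String.ofList [c]) chars = false := by
      cases hx : PySem.Str.isIn (String.ofList [c]) chars
      · rfl
      · exact absurd (h1.mp hx) hc
    simp only [PySem.Str.isIn_eq, String.toList_ofList] at hA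
    simp [hA, pv_mem_map_mk, hc]

-- ===== VERDICT (by name: the statement is the Claim_ definition above) =====
theorem find_chars_spec : Claim_equal_find_chars := by
  intro strChars chars _
  unfold Spec_find_chars find_chars find_chars_alt
  by_cases h0 : strChars == "none"
  · simp [h0]
  · by_cases h1 : strChars == "alphabet"
    · simp only [h0, h1, if_true, if_false, Bool.false_eq_true]
      decide
    · by_cases h2 : strChars == "numbers"
      · simp only [h0, h1, h2, if_true, if_false, Bool.false_eq_true]
        decide
      · by_cases h3 : strChars == "alnum"
        · simp only [h0, h1, h2, h3, if_true, if_false, Bool.false_eq_true]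
          decide
        · simp only [h0, h1, h2, h3, if_false, Bool.false_eq_true]
          exact pv_else_eq chars
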